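-- pv_equiv track=rewrite | github.com/ZeroSum24/Automated_Financial_Calculator | app/src/utils/misc_methods.py | dict_equals
-- ===== SOURCE A (Python) =====
-- def dict_equals(d1: dict, d2: dict) -> bool:
--     """
--     Commparing if two dictionaries are equal
--
--     :param d1:
--     :param d2:
--     :return:
--     """
--
--     dict_equal = False
--
--     # converting the dictionary keys to a set
--     d1_keys = set(d1.keys())
--     d2_keys = set(d2.keys())
--
--     # building a set of keys for which all the values match
--     intersect_keys = d1_keys.intersection(d2_keys)
--     same_values = set(o for o in intersect_keys if d1[o] == d2[o])
--
--     if len(same_values) == len(d1_keys) and len(same_values) == len(d2_keys):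
--         dict_equal = True
--
--     return dict_equal
-- ===== SOURCE B (Python) =====
-- def dict_equals(d1: dict, d2: dict) -> bool:
--     """
--     Comparing if two dictionaries are equal
--
--     :param d1:
--     :param d2:
--     :return:
--     """
--     if len(d1) != len(d2):
--         return False
--     for k, v in d1.items():
--         if k not in d2 or v != d2[k]:
--             return False
--     return True
-- ===== Notes on version B (the rewrite author's own statement) =====
-- stated objective: simpler
-- what changed: Replaces A's two key-set constructions, set intersection and matching-value-set length triangulation with a single length check followed by one early-exiting pass over d1's items comparing each value against d2.
import Mathlib
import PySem

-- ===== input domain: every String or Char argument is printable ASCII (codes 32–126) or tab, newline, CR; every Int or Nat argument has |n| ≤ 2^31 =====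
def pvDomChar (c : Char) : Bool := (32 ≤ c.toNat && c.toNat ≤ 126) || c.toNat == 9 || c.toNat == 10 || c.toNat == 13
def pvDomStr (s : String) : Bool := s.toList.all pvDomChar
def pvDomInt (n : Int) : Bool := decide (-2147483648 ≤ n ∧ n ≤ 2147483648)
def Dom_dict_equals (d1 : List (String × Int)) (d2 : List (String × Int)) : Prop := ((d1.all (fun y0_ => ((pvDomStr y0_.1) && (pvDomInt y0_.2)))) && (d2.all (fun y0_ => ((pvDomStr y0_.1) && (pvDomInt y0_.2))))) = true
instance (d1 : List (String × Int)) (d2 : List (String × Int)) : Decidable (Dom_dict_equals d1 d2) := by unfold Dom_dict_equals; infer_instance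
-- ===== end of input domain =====

-- B replaces A's key-set building, intersection and matching-set length triangulation with a
-- length check plus one early-exiting pass over d1's items (objective: simpler).

-- ===== PORT A =====
-- d1[o] / d2[o] are looked up only for o in both key sets, where Python's d[o] cannot raise;
-- comparing the two Option results with == is therefore exact (both are `some`).
def dict_equals (d1 : List (String × Int)) (d2 : List (String × Int)) : Bool :=
  let d1_keys : PySem.Set String := PySem.Set.ofList (d1.map Prod.fst)
  let d2_keys : PySem.Set String := PySem.Set.ofList (d2.map Prod.fst)
  let intersect_keys : PySem.Set String := PySem.Set.inter d1_keys d2_keys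
  let same_values : PySem.Set String :=
    PySem.Set.ofList (intersect_keys.filter
      (fun o => PySem.Dict.get? (PySem.Dict.mk d1) o == PySem.Dict.get? (PySem.Dict.mk d2) o))
  if PySem.Set.len same_values == PySem.Set.len d1_keys
      && PySem.Set.len same_values == PySem.Set.len d2_keys then true else false

-- ===== PORT B =====
-- 'for k, v in d1.items(): if k not in d2 or v != d2[k]: return False'
def dictEqualsAltLoop (d2 : PySem.Dict String Int) : List (String × Int) → Bool
  | [] => true
  | (k, v) :: rest =>
    match PySem.Dict.get? d2 k with
    | none => false                                   -- 'k not in d2'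
    | some w => if v != w then false else dictEqualsAltLoop d2 rest

def dict_equals_alt (d1 : List (String × Int)) (d2 : List (String × Int)) : Bool :=
  if d1.length != d2.length then false
  else dictEqualsAltLoop (PySem.Dict.mk d2) d1

-- ===== PRECONDITION & SPEC =====
-- Pre_ requires each association list to have pairwise-distinct keys: each models a Python dict,
-- which cannot hold duplicate keys, so no input the Python A accepts is excluded.
def Pre_dict_equals (d1 : List (String × Int)) (d2 : List (String × Int)) : Prop :=
  (d1.map Prod.fst).Nodup ∧ (d2.map Prod.fst).Nodup
instance (d1 : List (String × Int)) (d2 : List (String × Int)) : Decidable (Pre_dict_equals d1 d2) := by unfold Pre_dict_equals; infer_instance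

def pvWitness_dict_equals : (List (String × Int)) × (List (String × Int)) :=
  ([("a", 1), ("b", 2)], [("b", 2), ("a", 1)])

def Spec_dict_equals (d1 : List (String × Int)) (d2 : List (String × Int)) (out : Bool) : Prop := out = dict_equals_alt d1 d2
instance (d1 : List (String × Int)) (d2 : List (String × Int)) (out : Bool) : Decidable (Spec_dict_equals d1 d2 out) := by unfold Spec_dict_equals; infer_instance

-- ===== CLAIM (what is proved, stated in full; the proofs are below) =====
def Claim_equal_dict_equals : Prop := ∀ (d1 : List (String × Int)) (d2 : List (String × Int)), Dom_dict_equals d1 d2 → Pre_dict_equals d1 d2 → Spec_dict_equals d1 d2 (dict_equals d1 d2)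

-- ===== LEMMAS AND PROOFS =====

lemma loop_eq (d2 : PySem.Dict String Int) (l : List (String × Int)) :
    dictEqualsAltLoop d2 l = l.all (fun p => PySem.Dict.get? d2 p.1 == some p.2) := by
  induction l with
  | nil => rfl
  | cons p rest ih =>
    obtain ⟨k, v⟩ := p
    simp only [dictEqualsAltLoop, List.all_cons]
    cases h : PySem.Dict.get? d2 k with
    | none => simp
    | some w =>
      by_cases hv : v = w
      · simp [hv, ih]
      · simp [hv, Ne.symm hv]

lemma alt_iff (d1 d2 : List (String × Int)) :
    dict_equals_alt d1 d2 = true ↔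
      (d1.length = d2.length ∧
        ∀ p ∈ d1, PySem.Dict.get? (PySem.Dict.mk d2) p.1 = some p.2) := by
  unfold dict_equals_alt
  by_cases h : d1.length = d2.length
  · simp [h, loop_eq, List.all_eq_true]
  · simp [h]

lemma ite_tf_iff (c : Prop) [Decidable c] : ((if c then true else false) = true) ↔ c := by
  split_ifs with h <;> simp [h]

lemma a_iff (d1 d2 : List (String × Int))
    (h1 : (d1.map Prod.fst).Nodup) (h2 : (d2.map Prod.fst).Nodup) :
    dict_equals d1 d2 = true ↔
      ((∀ p ∈ d1, PySem.Dict.get? (PySem.Dict.mk d2) p.1 = some p.2) ∧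
        d1.length = d2.length) := by
  have hK1 : PySem.Set.ofList (d1.map Prod.fst) = d1.map Prod.fst := by simp [pysem, h1]
  have hK2 : PySem.Set.ofList (d2.map Prod.fst) = d2.map Prod.fst := by simp [pysem, h2]
  have hnd1 : (PySem.Dict.mk d1).keys.Nodup := by simpa [PySem.Dict.keys] using h1
  have hndG : ((d1.map Prod.fst).filter
      (fun x => (PySem.Dict.get? (PySem.Dict.mk d1) x == PySem.Dict.get? (PySem.Dict.mk d2) x)
        && (d2.map Prod.fst).contains x)).Nodup := h1.filter _
  have hGdef : List.filter
      (fun o => PySem.Dict.get? (PySem.Dict.mk d1) o == PySem.Dict.get? (PySem.Dict.mk d2) o)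
      (PySem.Set.inter (d1.map Prod.fst) (d2.map Prod.fst)) =
      (d1.map Prod.fst).filter
      (fun x => (PySem.Dict.get? (PySem.Dict.mk d1) x == PySem.Dict.get? (PySem.Dict.mk d2) x)
        && (d2.map Prod.fst).contains x) := by
    show (((d1.map Prod.fst).filter (fun x => (d2.map Prod.fst).contains x)).filter
      (fun o => PySem.Dict.get? (PySem.Dict.mk d1) o == PySem.Dict.get? (PySem.Dict.mk d2) o)) = _
    rw [List.filter_filter]
  have crux : (∀ x ∈ d1.map Prod.fst,
      ((PySem.Dict.get? (PySem.Dict.mk d1) x == PySem.Dict.get? (PySem.Dict.mk d2) x)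
        && (d2.map Prod.fst).contains x) = true) ↔
      (∀ p ∈ d1, PySem.Dict.get? (PySem.Dict.mk d2) p.1 = some p.2) := by
    constructor
    · intro h p hp
      have hg1 : PySem.Dict.get? (PySem.Dict.mk d1) p.1 = some p.2 :=
        PySem.Dict.get?_of_mem_items _ (by simpa using hp) hnd1
      have := h p.1 (List.mem_map_of_mem hp)
      simp only [Bool.and_eq_true, beq_iff_eq, hg1] at this
      exact this.1.symm
    · intro hC x hx
      obtain ⟨p, hp, rfl⟩ := List.mem_map.mp hx
      have hg1 : PySem.Dict.get? (PySem.Dict.mk d1) p.1 = some p.2 :=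
        PySem.Dict.get?_of_mem_items _ (by simpa using hp) hnd1
      have hg2 := hC p hp
      have hmem : p.1 ∈ d2.map Prod.fst := by
        have := PySem.Dict.mem_items_of_get?_eq_some _ hg2
        exact List.mem_map_of_mem (by simpa using this)
      simp [hg1, hg2, hmem]
  simp only [dict_equals, hK1, hK2]
  rw [hGdef, PySem.Set.ofList_eq_self_of_nodup _ hndG, ite_tf_iff]
  simp only [PySem.Set.len, Bool.and_eq_true, beq_iff_eq, Nat.cast_inj, List.length_map]
  constructor
  · rintro ⟨hl1, hl2⟩
    have hfe := (List.filter_sublist (l := d1.map Prod.fst)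
        (p := fun x => (PySem.Dict.get? (PySem.Dict.mk d1) x == PySem.Dict.get? (PySem.Dict.mk d2) x)
          && (d2.map Prod.fst).contains x)).eq_of_length
      (by simpa [List.length_map] using hl1)
    exact ⟨crux.mp (List.filter_eq_self.mp hfe), by omega⟩
  · rintro ⟨hC, hlen⟩
    have hall := crux.mpr hC
    rw [List.filter_eq_self.mpr hall]
    simp [List.length_map, hlen]

-- ===== VERDICT (by name: the statement is the Claim_ definition above) =====
theorem dict_equals_spec : Claim_equal_dict_equals := by
  intro d1 d2 _ hpre
  unfold Spec_dict_equals
  rw [Bool.eq_iff_iff, a_iff d1 d2 hpre.1 hpre.2, alt_iff]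
  tauto
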